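-- pv_equiv track=rewrite | github.com/muhalfian/prayuga-sentiment | helper/preprocessing.py | removeSpaceOnUrl
-- ===== SOURCE A (Python) =====
-- def removeSpaceOnUrl(content):
--   s = content.split('http');
--   part_content = [];
--   if(len(s) > 1):
--     part_content.append(s[0]);
--
--     part_url      = s[1].split('/');
--     part_url_real = [];
--     i = 0;
--     for part in part_url:
--       if(i < len(part_url)-1):
--         part = part.replace(" ","");
--       if(i==0):
--         part_url_real.append(""+part);
--       else:
--         part_url_real.append("/"+part);
--       i = i+1;
--     part_url = ''.join(part_url_real);
--     part_url = "http"+part_url;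
--     part_content.append(part_url);
--
--     content = ''.join(part_content);
--     # print content;
--   return content;
-- ===== SOURCE B (Python) =====
-- def removeSpaceOnUrl(content):
--     s = content.split('http')
--     if len(s) <= 1:
--         return content
--     pieces = s[1].rsplit('/', 1)
--     if len(pieces) == 1:
--         processed = s[1]
--     else:
--         processed = pieces[0].replace(' ', '') + '/' + pieces[1]
--     return s[0] + 'http' + processed
-- ===== Notes on version B (the rewrite author's own statement) =====
-- stated objective: simpler
-- what changed: Replaces the index-tracking loop over all slash-separated segments (strip spaces from each non-final segment, re-join with slashes) by a single rsplit on the last slash: strip all spaces from everything before the last slash and keep the final segment unchanged, which yields the same string because a slash is never a space.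
import Mathlib
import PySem

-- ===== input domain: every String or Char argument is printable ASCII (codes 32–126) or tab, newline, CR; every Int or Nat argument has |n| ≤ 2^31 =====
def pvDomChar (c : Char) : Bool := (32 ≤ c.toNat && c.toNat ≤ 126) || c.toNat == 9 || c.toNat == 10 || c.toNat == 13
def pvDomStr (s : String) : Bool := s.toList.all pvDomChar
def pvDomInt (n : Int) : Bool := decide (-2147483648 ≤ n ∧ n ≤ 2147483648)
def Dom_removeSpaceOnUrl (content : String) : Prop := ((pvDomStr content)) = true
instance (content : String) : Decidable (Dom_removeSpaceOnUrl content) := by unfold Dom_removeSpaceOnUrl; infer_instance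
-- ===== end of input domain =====

-- B replaces A's index-tracking per-segment loop by one rsplit('/', 1); same return value, objective: simpler.

-- ===== PORT A =====
-- one iteration of A's 'for part in part_url' loop; state = (i, part_url_real), n = len(part_url)
def aStep (n : Nat) (st : Nat × List (List Char)) (part : List Char) : Nat × List (List Char) :=
  let part := if st.1 < n - 1 then PySem.Chars.replace part [' '] [] else part
  (st.1 + 1, if st.1 == 0 then st.2 ++ [part] else st.2 ++ ['/' :: part])

def removeSpaceOnUrl (content : String) : String :=
  let s := PySem.Chars.splitOn content.toList ('h' :: 't' :: 't' :: 'p' :: [])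
  if 1 < s.length then
    -- s[0], s[1] are in range because len(s) > 1
    let partContent0 := s.getD 0 []
    let partUrl := PySem.Chars.splitOn (s.getD 1 []) ['/']
    let res := partUrl.foldl (aStep partUrl.length) (0, [])
    String.mk (partContent0 ++ ('h' :: 't' :: 't' :: 'p' :: PySem.Chars.join [] res.2))
  else content

-- ===== PORT B =====
-- hand port of s.rsplit('/', 1): none ↔ the result list has length 1 (no '/');
-- some (h, t) ↔ the result is [h, t], splitting at the LAST '/'. Exact for a single-char separator.
def rsplitSlash1 : List Char → Option (List Char × List Char)
  | [] => none
  | c :: rest =>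
    match rsplitSlash1 rest with
    | some (h, t) => some (c :: h, t)
    | none => if c = '/' then some ([], rest) else none

def removeSpaceOnUrl_alt (content : String) : String :=
  let s := PySem.Chars.splitOn content.toList ('h' :: 't' :: 't' :: 'p' :: [])
  if s.length ≤ 1 then content
  else
    let s1 := s.getD 1 []
    let processed :=
      match rsplitSlash1 s1 with
      | none => s1
      | some (h, t) => PySem.Chars.replace h [' '] [] ++ '/' :: t
    String.mk (s.getD 0 [] ++ ('h' :: 't' :: 't' :: 'p' :: processed))

-- ===== PRECONDITION & SPEC =====
def Spec_removeSpaceOnUrl (content : String) (out : String) : Prop := out = removeSpaceOnUrl_alt content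
instance (content : String) (out : String) : Decidable (Spec_removeSpaceOnUrl content out) := by unfold Spec_removeSpaceOnUrl; infer_instance

-- ===== CLAIM (what is proved, stated in full; the proofs are below) =====
def Claim_equal_removeSpaceOnUrl : Prop := ∀ (content : String), Dom_removeSpaceOnUrl content → Spec_removeSpaceOnUrl content (removeSpaceOnUrl content)

-- ===== LEMMAS AND PROOFS =====

-- splitting on a single char, structurally
def splitChar : List Char → List (List Char)
  | [] => [[]]
  | c :: rest =>
    if c = '/' then [] :: splitChar rest
    else
      match splitChar rest with
      | [] => [[c]]
      | p :: ps => (c :: p) :: ps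

-- A's join of the processed segments, structurally
def segJoin : List (List Char) → List Char
  | [] => []
  | [p] => p
  | p :: q :: ps => PySem.Chars.replace p [' '] [] ++ '/' :: segJoin (q :: ps)

-- A's join of the processed segments at positions ≥ 1 (each is '/'-prefixed)
def tailJoin : List (List Char) → List Char
  | [] => []
  | [q] => '/' :: q
  | q :: r :: qs => '/' :: PySem.Chars.replace q [' '] [] ++ tailJoin (r :: qs)

theorem splitChar_ne_nil (cs : List Char) : splitChar cs ≠ [] := by
  cases cs with
  | nil => simp [splitChar]
  | cons c rest =>
    simp only [splitChar]
    split
    · simp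
    · cases h : splitChar rest <;> simp

theorem replace_go_eq_filter (fuel : Nat) (l acc : List Char) (h : l.length ≤ fuel) :
    PySem.Chars.replace.go [' '] [] fuel l acc = acc.reverse ++ l.filter (fun c => !(c == ' ')) := by
  induction fuel generalizing l acc with
  | zero =>
    interval_cases hl : l.length
    cases l with
    | nil => simp [PySem.Chars.replace.go]
    | cons c t => simp at hl
  | succ fuel ih =>
    cases l with
    | nil => simp [PySem.Chars.replace.go]
    | cons c t =>
      simp only [PySem.Chars.replace.go]
      by_cases hc : c = ' '
      · subst hc
        simp only [List.isPrefixOf, BEq.rfl, Bool.true_and, List.isPrefixOf_nil_left, if_true]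
        rw [ih] <;> simp_all
      · have : List.isPrefixOf [' '] (c :: t) = false := by
          simp [List.isPrefixOf]; exact fun h => absurd h.symm hc
        rw [this]
        simp only [Bool.false_eq_true, if_false]
        rw [ih t (c :: acc) (by simpa using Nat.le_of_succ_le_succ h)]
        simp [hc]

theorem replace_eq_filter (l : List Char) :
    PySem.Chars.replace l [' '] [] = l.filter (fun c => !(c == ' ')) := by
  simp only [PySem.Chars.replace]
  rw [if_neg (by simp)]
  rw [replace_go_eq_filter l.length l [] le_rfl]
  simp

-- splitOn with separator "/" computes splitChar
theorem splitOn_go_slash (fuel : Nat) (l cur : List Char) (acc : List (List Char))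
    (h : l.length < fuel) :
    PySem.Chars.splitOn.go ['/'] fuel l cur acc =
      acc.reverse ++ (match splitChar l with
        | [] => []
        | p :: ps => (cur.reverse ++ p) :: ps) := by
  induction fuel generalizing l cur acc with
  | zero => omega
  | succ fuel ih =>
    cases l with
    | nil => simp [PySem.Chars.splitOn.go, splitChar]
    | cons c rest =>
      by_cases hc : c = '/'
      · subst hc
        have hpre : List.isPrefixOf ['/'] ('/' :: rest) = true := by simp [List.isPrefixOf]
        simp only [PySem.Chars.splitOn.go, hpre, if_true, List.length_cons, List.drop_succ_cons,
          List.length_nil, List.drop_zero]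
        rw [ih rest [] (cur.reverse :: acc) (by simpa using Nat.lt_of_succ_lt_succ h)]
        simp only [splitChar, if_pos rfl]
        cases hs : splitChar rest with
        | nil => exact absurd hs (splitChar_ne_nil rest)
        | cons p ps => simp
      · have hpre : List.isPrefixOf ['/'] (c :: rest) = false := by
          simp [List.isPrefixOf]; exact fun h => absurd h.symm hc
        simp only [PySem.Chars.splitOn.go, hpre, Bool.false_eq_true, if_false]
        rw [ih rest (c :: cur) acc (by simpa using Nat.lt_of_succ_lt_succ h)]
        simp only [splitChar, if_neg hc]
        cases hs : splitChar rest with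
        | nil => exact absurd hs (splitChar_ne_nil rest)
        | cons p ps => simp

theorem splitOn_slash (cs : List Char) :
    PySem.Chars.splitOn cs ['/'] = splitChar cs := by
  simp only [PySem.Chars.splitOn]
  rw [splitOn_go_slash (cs.length + 1) cs [] [] (by omega)]
  cases hs : splitChar cs with
  | nil => exact absurd hs (splitChar_ne_nil cs)
  | cons p ps => simp

-- rsplitSlash1 returns none exactly when there is no '/'
theorem rsplitSlash1_eq_none_iff (cs : List Char) :
    rsplitSlash1 cs = none ↔ '/' ∉ cs := by
  induction cs with
  | nil => simp [rsplitSlash1]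
  | cons c rest ih =>
    simp only [rsplitSlash1]
    cases h : rsplitSlash1 rest with
    | none =>
      by_cases hc : c = '/'
      · simp [hc]
      · have : '/' ∉ rest := ih.mp h
        simp only [hc, if_false, List.mem_cons, not_or]
        constructor
        · intro _; exact ⟨fun hh => hc hh.symm, this⟩
        · intro _; trivial
    | some pr =>
      obtain ⟨a, b⟩ := pr
      have : '/' ∈ rest := by
        by_contra hn
        rw [← ih] at hn
        simp [hn] at h
      simp [this]

theorem splitChar_no_slash (cs : List Char) (h : '/' ∉ cs) : splitChar cs = [cs] := by
  induction cs with
  | nil => simp [splitChar]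
  | cons c rest ih =>
    simp only [List.mem_cons, not_or] at h
    simp [splitChar, Ne.symm h.1, ih h.2]

theorem splitChar_two_le (cs : List Char) (h : '/' ∈ cs) : 2 ≤ (splitChar cs).length := by
  induction cs with
  | nil => simp at h
  | cons c rest ih =>
    simp only [splitChar]
    by_cases hc : c = '/'
    · rw [if_pos hc]
      have := splitChar_ne_nil rest
      cases hs : splitChar rest with
      | nil => exact absurd hs this
      | cons p ps => simp
    · rw [if_neg hc]
      have hrest : '/' ∈ rest := by
        rcases List.mem_cons.mp h with h1 | h1
        · exact absurd h1.symm hc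
        · exact h1
      cases hs : splitChar rest with
      | nil => exact absurd hs (splitChar_ne_nil rest)
      | cons p ps =>
        have := ih hrest
        rw [hs] at this
        simpa using this

-- core: segJoin of the split equals B's rsplit-based processing
theorem segJoin_splitChar (cs : List Char) :
    segJoin (splitChar cs) =
      (match rsplitSlash1 cs with
       | none => cs
       | some (h, t) => PySem.Chars.replace h [' '] [] ++ '/' :: t) := by
  induction cs with
  | nil => simp [splitChar, segJoin, rsplitSlash1]
  | cons c rest ih =>
    simp only [splitChar, rsplitSlash1]
    by_cases hc : c = '/'
    · rw [if_pos hc]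
      cases hr : rsplitSlash1 rest with
      | none =>
        -- no '/' in rest
        have hns : '/' ∉ rest := (rsplitSlash1_eq_none_iff rest).mp hr
        rw [splitChar_no_slash rest hns]
        subst hc
        simp [segJoin, replace_eq_filter]
      | some p =>
        obtain ⟨h, t⟩ := p
        rw [hr] at ih
        have h2 : 2 ≤ (splitChar rest).length :=
          splitChar_two_le rest (by
            by_contra hn
            rw [← rsplitSlash1_eq_none_iff] at hn
            simp [hn] at hr)
        cases hs : splitChar rest with
        | nil => exact absurd hs (splitChar_ne_nil rest)
        | cons p ps =>
          cases ps with
          | nil => rw [hs] at h2; simp at h2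
          | cons q qs =>
            rw [hs] at ih
            subst hc
            simp only [segJoin, replace_eq_filter] at ih ⊢
            simp [ih, replace_eq_filter]
    · rw [if_neg hc]
      cases hr : rsplitSlash1 rest with
      | none =>
        have hns : '/' ∉ rest := (rsplitSlash1_eq_none_iff rest).mp hr
        rw [splitChar_no_slash rest hns]
        rw [hr] at ih
        rw [splitChar_no_slash rest hns] at ih
        simp only [segJoin] at ih ⊢
        simp [if_neg hc, ih]
      | some p =>
        obtain ⟨h, t⟩ := p
        rw [hr] at ih
        have h2 : 2 ≤ (splitChar rest).length :=
          splitChar_two_le rest (by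
            by_contra hn
            rw [← rsplitSlash1_eq_none_iff] at hn
            simp [hn] at hr)
        cases hs : splitChar rest with
        | nil => exact absurd hs (splitChar_ne_nil rest)
        | cons p ps =>
          cases ps with
          | nil => rw [hs] at h2; simp at h2
          | cons q qs =>
            rw [hs] at ih
            simp only [if_neg hc, segJoin, replace_eq_filter] at ih ⊢
            rw [List.filter_cons, List.filter_cons]
            cases hb : !(c == ' ') <;> simp [ih]

theorem join_nil_eq_flatten (l : List (List Char)) :
    PySem.Chars.join [] l = l.flatten := by
  simp only [PySem.Chars.join]
  induction l with
  | nil => simp [List.intercalate]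
  | cons a l ih =>
    cases l with
    | nil => simp [List.intercalate]
    | cons b l =>
      simp only [List.intercalate, List.intersperse] at ih ⊢
      simp_all

-- the fold invariant for positions ≥ 1
theorem foldA_tail (n : Nat) (qs : List (List Char)) (i : Nat) (acc : List (List Char))
    (hn : i + qs.length = n) (hi : 1 ≤ i) :
    (qs.foldl (aStep n) (i, acc)).2.flatten = acc.flatten ++ tailJoin qs := by
  induction qs generalizing i acc with
  | nil => simp [tailJoin]
  | cons q rest ih =>
    simp only [List.foldl_cons]
    cases rest with
    | nil =>
      simp only [List.length_cons, List.length_nil] at hn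
      have hlt : ¬ i < n - 1 := by omega
      have hne : (i == 0) = false := by simp; omega
      simp [aStep, hlt, hne, tailJoin]
    | cons r rs =>
      have hlt : i < n - 1 := by
        simp only [List.length_cons] at hn
        omega
      have hne : (i == 0) = false := by simp; omega
      simp only [aStep, if_pos hlt, hne, Bool.false_eq_true, if_false]
      rw [ih (i + 1) _ (by simp at hn ⊢; omega) (by omega)]
      simp [tailJoin]

theorem tailJoin_eq (qs : List (List Char)) (h : qs ≠ []) :
    tailJoin qs = '/' :: segJoin qs := by
  induction qs with
  | nil => simp at h
  | cons q rest ih =>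
    cases rest with
    | nil => simp [tailJoin, segJoin]
    | cons r rs => simp [tailJoin, segJoin, ih]

theorem foldA_eq_segJoin (ps : List (List Char)) :
    (ps.foldl (aStep ps.length) (0, [])).2.flatten = segJoin ps := by
  cases ps with
  | nil => simp [segJoin]
  | cons p rest =>
    simp only [List.foldl_cons]
    cases rest with
    | nil =>
      have : ¬ (0 : Nat) < [p].length - 1 := by simp
      simp [aStep, this, segJoin]
    | cons q qs =>
      have hlt : (0 : Nat) < (p :: q :: qs).length - 1 := by simp
      simp only [aStep, if_pos hlt, beq_self_eq_true, if_true]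
      rw [foldA_tail _ _ 1 _ (by simp; omega) le_rfl]
      rw [tailJoin_eq _ (by simp)]
      simp [segJoin]

-- ===== VERDICT (by name: the statement is the Claim_ definition above) =====
theorem removeSpaceOnUrl_spec : Claim_equal_removeSpaceOnUrl := by
  intro content _
  unfold Spec_removeSpaceOnUrl removeSpaceOnUrl removeSpaceOnUrl_alt
  simp only []
  set s := PySem.Chars.splitOn content.toList ('h' :: 't' :: 't' :: 'p' :: []) with hs
  by_cases h1 : 1 < s.length
  · rw [if_pos h1, if_neg (by omega)]
    congr 1
    congr 1
    congr 2
    rw [join_nil_eq_flatten, foldA_eq_segJoin, splitOn_slash, segJoin_splitChar]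
  · rw [if_neg h1, if_pos (by omega)]
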